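-- pv_equiv track=rewrite | github.com/asweigart/programmedpatterns | book/visualpatterns.py | pattern30
-- ===== SOURCE A (Python) =====
-- def pattern30(step):
--     pattern = 'O'
--     i = 2
--     while True:
--         if i > step:
--             break
--         pattern += 'OO'
--         i += 1
--
--         if i > step:
--             break
--         pattern += 'O'
--         i += 1
--     return pattern
-- ===== SOURCE B (Python) =====
-- def pattern30(step):
--     # closed form: after the initial 'O', the loop performs n = max(step-1, 0)
--     # appends, alternating 'OO' and 'O': each full pair contributes 'OOO',
--     # a leftover odd append contributes 'OO'
--     n = max(step - 1, 0)
--     return 'O' + 'OOO' * (n // 2) + 'OO' * (n % 2)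
-- ===== Notes on version B (the rewrite author's own statement) =====
-- stated objective: faster
-- what changed: Replaces the append-per-iteration while loop by a closed form: the n = max(step-1,0) appends contribute 'OOO' per pair plus 'OO' for a leftover odd one, so B returns 'O' + 'OOO'*(n//2) + 'OO'*(n%2) directly.
import Mathlib
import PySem

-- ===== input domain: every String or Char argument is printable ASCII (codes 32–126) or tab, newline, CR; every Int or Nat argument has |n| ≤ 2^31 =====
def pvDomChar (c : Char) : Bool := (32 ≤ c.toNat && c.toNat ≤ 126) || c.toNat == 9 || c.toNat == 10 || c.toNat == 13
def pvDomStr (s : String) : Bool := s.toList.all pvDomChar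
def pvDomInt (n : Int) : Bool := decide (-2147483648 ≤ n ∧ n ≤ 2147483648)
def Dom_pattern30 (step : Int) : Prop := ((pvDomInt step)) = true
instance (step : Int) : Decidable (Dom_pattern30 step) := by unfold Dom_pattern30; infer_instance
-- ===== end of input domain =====

-- B replaces A's append-per-iteration loop by a closed-form 'O' + 'OOO'*(n//2) + 'OO'*(n%2); objective: faster (asymptotic).
-- ===== PORT A =====
-- loop of A: alternately append "OO" then "O" while i ≤ step
def pattern30Loop (step i : Int) (pattern : String) : String :=
  if i > step then pattern
  else
    let pattern := pattern ++ "OO"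
    let i := i + 1
    if i > step then pattern
    else pattern30Loop step (i + 1) (pattern ++ "O")
termination_by (step - i).toNat
decreasing_by simp at *; omega

def pattern30 (step : Int) : String := pattern30Loop step 2 "O"

-- ===== PORT B =====
-- B: closed form — 'O' + 'OOO' * (n // 2) + 'OO' * (n % 2); the hand port of
-- Python's str * int is (List.replicate k l).flatten, exact for k = the nonneg count here
def pattern30_alt (step : Int) : String :=
  let n := max (step - 1) 0
  String.ofList ((['O'] ++ (List.replicate (PySem.Int.floordiv n 2).toNat ['O','O','O']).flatten)
    ++ (List.replicate (PySem.Int.mod n 2).toNat ['O','O']).flatten)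

-- ===== PRECONDITION & SPEC =====
def Spec_pattern30 (step : Int) (out : String) : Prop := out = pattern30_alt step
instance (step : Int) (out : String) : Decidable (Spec_pattern30 step out) := by unfold Spec_pattern30; infer_instance

-- ===== CLAIM (what is proved, stated in full; the proofs are below) =====
def Claim_equal_pattern30 : Prop := ∀ (step : Int), Dom_pattern30 step → Spec_pattern30 step (pattern30 step)

-- ===== LEMMAS AND PROOFS =====

-- ===== VERDICT (by name: the statement is the Claim_ definition above) =====
-- the loop, started on an all-'O' string, returns an all-'O' string whose
-- length grows by 3 per remaining pair of iterations (n = remaining iteration count)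
lemma pattern30Loop_replicate (n : Nat) : ∀ (step i : Int) (m : Nat),
    (step - i + 1).toNat = n →
    pattern30Loop step i (String.ofList (List.replicate m 'O'))
      = String.ofList (List.replicate (m + (3 * (n / 2) + 2 * (n % 2))) 'O') := by
  induction n using Nat.strong_induction_on with
  | _ n ih =>
    intro step i m hn
    rw [pattern30Loop]
    by_cases h1 : i > step
    · have : n = 0 := by omega
      simp [h1, this]
    · have hn1 : 1 ≤ n := by omega
      simp only [h1, if_false]
      by_cases h2 : i + 1 > step
      · have : n = 1 := by omega
        subst this
        have : (String.ofList (List.replicate m 'O')) ++ "OO"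
            = String.ofList (List.replicate (m + 2) 'O') := by
          show String.ofList _ ++ String.ofList ['O','O'] = _
          simp [String.ofList_append, List.replicate_add]
        simp [h2, this]
      · have hn2 : 2 ≤ n := by omega
        have hrec := ih (n - 2) (by omega) step (i + 2) (m + 3) (by omega)
        have habb : (String.ofList (List.replicate m 'O')) ++ "OO" ++ "O"
            = String.ofList (List.replicate (m + 3) 'O') := by
          show String.ofList _ ++ String.ofList ['O','O'] ++ String.ofList ['O'] = _
          have h3 : List.replicate (m + 3) 'O' = List.replicate m 'O' ++ ['O','O'] ++ ['O'] := by
            rw [List.append_assoc, show (['O','O'] ++ ['O'] : List Char) = List.replicate 3 'O' from rfl,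
              ← List.replicate_add]
          rw [h3, String.ofList_append, String.ofList_append]
        simp only [h2, if_false]
        have hi : i + 1 + 1 = i + 2 := by ring
        rw [hi, habb, hrec]
        have hc : m + 3 + (3 * ((n - 2) / 2) + 2 * ((n - 2) % 2))
            = m + (3 * (n / 2) + 2 * (n % 2)) := by omega
        rw [hc]

lemma flatten_replicate_three (k : Nat) :
    (List.replicate k (['O','O','O'] : List Char)).flatten = List.replicate (k * 3) 'O' := by
  induction k with
  | zero => rfl
  | succ n ih => simp [List.replicate_succ, ih, Nat.succ_mul]

lemma flatten_replicate_two (k : Nat) :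
    (List.replicate k (['O','O'] : List Char)).flatten = List.replicate (k * 2) 'O' := by
  induction k with
  | zero => rfl
  | succ n ih => simp [List.replicate_succ, ih, Nat.succ_mul]

theorem pattern30_spec : Claim_equal_pattern30 := by
  intro step _
  unfold Spec_pattern30 pattern30 pattern30_alt
  have h := pattern30Loop_replicate (step - 1).toNat step 2 1 (by omega)
  show pattern30Loop step 2 (String.ofList (List.replicate 1 'O')) = _
  rw [h]
  have hn : max (step - 1) 0 = ((step - 1).toNat : Int) := by omega
  rw [hn]
  simp only [PySem.Int.floordiv_eq_ediv_of_pos (show (0:Int) < 2 by norm_num),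
    PySem.Int.mod_eq_emod_of_pos (show (0:Int) < 2 by norm_num),
    flatten_replicate_three, flatten_replicate_two]
  rw [show (['O'] : List Char) = List.replicate 1 'O' from rfl,
    ← List.replicate_add, ← List.replicate_add]
  congr 2
  omega
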